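-- pv_equiv track=rewrite | github.com/RamaHernandez03/tp2 | algo_twitter.py | normalizar
-- ===== SOURCE A (Python) =====
-- def normalizar(texto):
--     """ Convierte el texto a minsculas y divide en palabras alfaNum. """
--     texto = texto.lower()
--     palabra = ""
--     palabras = []
--     for letra in texto:
--         if letra.isalnum():
--             palabra += letra
--         elif palabra:
--             palabras.append(palabra)
--             palabra = ""
--
--     if palabra:
--         palabras.append(palabra)
--     return palabras
-- ===== SOURCE B (Python) =====
-- def normalizar(texto):
--     """Lowercase the text and split into maximal alphanumeric runs (span scan)."""
--     t = texto.lower()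
--     palabras = []
--     i, n = 0, len(t)
--     while i < n:
--         if t[i].isalnum():
--             j = i
--             while j < n and t[j].isalnum():
--                 j += 1
--             palabras.append(t[i:j])
--             i = j
--         else:
--             i += 1
--     return palabras
-- ===== Notes on version B (the rewrite author's own statement) =====
-- stated objective: alternative
-- what changed: Replaces A's per-character accumulator/flush state machine with a two-pointer span scan that takes each maximal alphanumeric run as a slice, skipping separators.
import Mathlib
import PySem

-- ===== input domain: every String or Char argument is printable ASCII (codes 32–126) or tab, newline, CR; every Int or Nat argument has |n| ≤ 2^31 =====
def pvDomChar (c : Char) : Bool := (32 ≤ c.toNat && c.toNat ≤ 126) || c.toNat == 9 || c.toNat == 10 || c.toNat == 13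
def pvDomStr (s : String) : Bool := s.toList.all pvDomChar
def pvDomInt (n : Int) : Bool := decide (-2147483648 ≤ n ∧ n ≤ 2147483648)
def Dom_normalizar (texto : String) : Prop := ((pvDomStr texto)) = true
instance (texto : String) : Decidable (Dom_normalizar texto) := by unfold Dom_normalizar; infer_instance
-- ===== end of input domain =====

-- B replaces A's accumulator/flush state machine with a two-pointer span scan over maximal
-- alphanumeric runs; same O(n) cost, different decomposition.

-- ===== PORT A =====
-- the for-loop over the characters with its state (palabra, palabras)
def normLoop : List Char → List Char → List String → List Char × List String
  | [], pal, pals => (pal, pals)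
  | letra :: rest, pal, pals =>
    if PySem.Chars.isalnum letra then normLoop rest (pal ++ [letra]) pals
    else if pal ≠ [] then normLoop rest [] (pals ++ [String.mk pal])
    else normLoop rest pal pals

def normalizar (texto : String) : List String :=
  let st := normLoop (PySem.Str.lower texto).toList [] []
  if st.1 ≠ [] then st.2 ++ [String.mk st.1] else st.2

-- ===== PORT B =====
-- the outer while-loop: skip a non-alnum char, or take the maximal alnum run as a slice
def altGo : List Char → List String
  | [] => []
  | c :: cs =>
    if PySem.Chars.isalnum c then
      String.mk ((c :: cs).takeWhile PySem.Chars.isalnum)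
        :: altGo ((c :: cs).dropWhile PySem.Chars.isalnum)
    else altGo cs
termination_by l => l.length
decreasing_by
  · simp only [List.dropWhile_cons, *, if_pos, List.length_cons]
    exact Nat.lt_succ_of_le (List.length_dropWhile_le _ _)
  · simp

def normalizar_alt (texto : String) : List String :=
  altGo (PySem.Str.lower texto).toList

-- ===== PRECONDITION & SPEC =====
def Spec_normalizar (texto : String) (out : List String) : Prop := out = normalizar_alt texto
instance (texto : String) (out : List String) : Decidable (Spec_normalizar texto out) := by unfold Spec_normalizar; infer_instance

-- ===== CLAIM (what is proved, stated in full; the proofs are below) =====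
def Claim_equal_normalizar : Prop := ∀ (texto : String), Dom_normalizar texto → Spec_normalizar texto (normalizar texto)

-- ===== LEMMAS AND PROOFS =====

-- one-step unfolding equations for altGo (well-founded recursion)
lemma altGo_nil : altGo [] = [] := by rw [altGo]

lemma altGo_cons (c : Char) (cs : List Char) :
    altGo (c :: cs) =
      if PySem.Chars.isalnum c then
        String.mk ((c :: cs).takeWhile PySem.Chars.isalnum)
          :: altGo ((c :: cs).dropWhile PySem.Chars.isalnum)
      else altGo cs := by rw [altGo]

-- B's result continued from a pending (possibly empty) word prefix
def altPend : List Char → List Char → List String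
  | pal, [] => if pal = [] then [] else [String.mk pal]
  | pal, c :: cs =>
    if PySem.Chars.isalnum c then altPend (pal ++ [c]) cs
    else (if pal = [] then [] else [String.mk pal]) ++ altPend [] cs

lemma altPend_eq (cs : List Char) : ∀ pal : List Char,
    altPend pal cs =
      if pal = [] then altGo cs
      else String.mk (pal ++ cs.takeWhile PySem.Chars.isalnum)
            :: altGo (cs.dropWhile PySem.Chars.isalnum) := by
  induction cs with
  | nil =>
    intro pal
    by_cases h : pal = [] <;> simp [altPend, altGo_nil, h]
  | cons c cs ih =>
    intro pal
    by_cases ha : PySem.Chars.isalnum c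
    · by_cases h : pal = []
      · subst h
        simp [altPend, ha, ih, altGo_cons, List.takeWhile_cons, List.dropWhile_cons]
      · have hpc : pal ++ [c] ≠ [] := by simp
        simp [altPend, ha, ih, hpc, h, List.takeWhile_cons, List.dropWhile_cons,
          List.append_assoc]
    · by_cases h : pal = []
      · subst h
        simp [altPend, ha, ih, altGo_cons]
      · simp [altPend, ha, ih, h, altGo_cons, List.takeWhile_cons, List.dropWhile_cons]

-- the state machine, finished off, equals the pending-word form of B
lemma normLoop_eq (cs : List Char) : ∀ (pal : List Char) (pals : List String),
    (if (normLoop cs pal pals).1 ≠ [] then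
        (normLoop cs pal pals).2 ++ [String.mk (normLoop cs pal pals).1]
      else (normLoop cs pal pals).2)
      = pals ++ altPend pal cs := by
  induction cs with
  | nil =>
    intro pal pals
    by_cases h : pal = [] <;> simp [normLoop, altPend, h]
  | cons c cs ih =>
    intro pal pals
    by_cases ha : PySem.Chars.isalnum c
    · simp [normLoop, altPend, ha, ih]
    · by_cases h : pal = []
      · simp [normLoop, altPend, ha, h, ih]
      · simp [normLoop, altPend, ha, h, ih, List.append_assoc]

-- ===== VERDICT (by name: the statement is the Claim_ definition above) =====
theorem normalizar_spec : Claim_equal_normalizar := by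
  intro texto _
  show _ = _
  simpa [normalizar, normalizar_alt, altPend_eq] using
    normLoop_eq (PySem.Str.lower texto).toList [] []
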